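-- pv_equiv track=rewrite | github.com/deeppavlov/deeppavlov_annotation_tools | ner/ner.py | is_measure
-- ===== SOURCE A (Python) =====
-- def is_measure(text: str) -> bool:
--     start_idx = -1
--     for idx in range(len(text)):
--         if not text[idx].isdigit():
--             start_idx = idx
--             break
--     if start_idx < 0:
--         return True
--     if start_idx == 0:
--         return False
--     res = True
--     for idx in range(start_idx, len(text)):
--         if text[idx].isdigit():
--             res = False
--             break
--     return res
-- ===== SOURCE B (Python) =====
-- def is_measure(text: str) -> bool:
--     seen_nondigit = False
--     for idx, ch in enumerate(text):
--         if ch.isdigit():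
--             if seen_nondigit:
--                 return False
--         else:
--             if idx == 0:
--                 return False
--             seen_nondigit = True
--     return True
-- ===== Notes on version B (the rewrite author's own statement) =====
-- stated objective: simpler
-- what changed: Replaced A's two sequential scans (find first non-digit index, then re-scan the remainder for a digit) by a single pass over enumerate(text) maintaining one seen_nondigit flag with early returns.
import Mathlib
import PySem

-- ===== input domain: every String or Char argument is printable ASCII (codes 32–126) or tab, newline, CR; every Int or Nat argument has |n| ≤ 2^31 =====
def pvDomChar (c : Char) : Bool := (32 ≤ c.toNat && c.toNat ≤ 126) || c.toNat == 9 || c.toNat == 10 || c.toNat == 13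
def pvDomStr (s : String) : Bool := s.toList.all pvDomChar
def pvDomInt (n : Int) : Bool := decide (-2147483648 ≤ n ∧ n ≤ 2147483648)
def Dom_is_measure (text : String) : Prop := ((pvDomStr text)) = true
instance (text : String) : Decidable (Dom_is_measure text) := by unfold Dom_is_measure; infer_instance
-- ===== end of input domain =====

-- B replaces A's two sequential scans by a single pass with one seen_nondigit flag (objective: simpler).

-- ===== PORT A =====
-- first loop of A: index of the first non-digit char (none = Python's -1 sentinel)
def aFind : List Char → Nat → Option Nat
  | [], _ => none
  | c :: cs, idx => if !(PySem.Chars.isdigit c) then some idx else aFind cs (idx + 1)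

-- second loop of A: res stays True unless a digit is met
def aScan : List Char → Bool
  | [] => true
  | c :: cs => if PySem.Chars.isdigit c then false else aScan cs

def is_measure (text : String) : Bool :=
  match aFind text.toList 0 with
  | none => true
  | some 0 => false
  | some s => aScan (text.toList.drop s)

-- ===== PORT B =====
def altGo : List Char → Nat → Bool → Bool
  | [], _, _ => true
  | c :: cs, idx, seen =>
      if PySem.Chars.isdigit c then
        if seen then false else altGo cs (idx + 1) seen
      else
        if idx == 0 then false else altGo cs (idx + 1) true

def is_measure_alt (text : String) : Bool := altGo text.toList 0 false

-- ===== PRECONDITION & SPEC =====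
def Spec_is_measure (text : String) (out : Bool) : Prop := out = is_measure_alt text
instance (text : String) (out : Bool) : Decidable (Spec_is_measure text out) := by unfold Spec_is_measure; infer_instance

-- ===== CLAIM (what is proved, stated in full; the proofs are below) =====
def Claim_equal_is_measure : Prop := ∀ (text : String), Dom_is_measure text → Spec_is_measure text (is_measure text)

-- ===== LEMMAS AND PROOFS =====

theorem aFind_shift (cs : List Char) : ∀ k : Nat, aFind cs k = (aFind cs 0).map (· + k) := by
  induction cs with
  | nil => intro k; simp [aFind]
  | cons c cs ih =>
    intro k
    by_cases h : PySem.Chars.isdigit c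
    · rw [show aFind (c :: cs) k = aFind cs (k + 1) from by simp [aFind, h],
          show aFind (c :: cs) 0 = aFind cs 1 from by simp [aFind, h],
          ih (k + 1), ih 1, Option.map_map]
      congr 1
      funext x
      simp
      omega
    · simp [aFind, h]

theorem aScan_altGo (l : List Char) : ∀ j : Nat, j ≠ 0 → aScan l = altGo l j true := by
  induction l with
  | nil => intro j _; simp [aScan, altGo]
  | cons c cs ih =>
    intro j hj
    by_cases h : PySem.Chars.isdigit c
    · simp [aScan, altGo, h]
    · simp [aScan, altGo, h, hj, ih (j + 1) (by omega)]

theorem tail_eq (cs : List Char) : ∀ i : Nat, i ≠ 0 →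
    (match aFind cs 0 with
     | none => true
     | some s => aScan (cs.drop s)) = altGo cs i false := by
  induction cs with
  | nil => intro i _; simp [aFind, altGo]
  | cons c cs ih =>
    intro i hi
    by_cases h : PySem.Chars.isdigit c
    · have hsh : aFind (c :: cs) 0 = (aFind cs 0).map (· + 1) := by
        simp [aFind, h, aFind_shift cs 1]
      rw [hsh]
      have hrhs : altGo (c :: cs) i false = altGo cs (i + 1) false := by
        simp [altGo, h]
      rw [hrhs, ← ih (i + 1) (by omega)]
      cases aFind cs 0 with
      | none => rfl
      | some s => simp
    · simp [aFind, altGo, aScan, h, hi]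
      exact aScan_altGo cs (i + 1) (by omega)

-- ===== VERDICT (by name: the statement is the Claim_ definition above) =====
theorem is_measure_spec : Claim_equal_is_measure := by
  intro text _
  unfold Spec_is_measure is_measure is_measure_alt
  rcases hl : text.toList with _ | ⟨c, cs⟩

  · simp [aFind, altGo]
  · by_cases h : PySem.Chars.isdigit c
    · have hsh : aFind (c :: cs) 0 = (aFind cs 0).map (· + 1) := by
        simp [aFind, h, aFind_shift cs 1]
      have hrhs : altGo (c :: cs) 0 false = altGo cs 1 false := by
        simp [altGo, h]
      rw [hsh, hrhs, ← tail_eq cs 1 (by omega)]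
      cases aFind cs 0 with
      | none => rfl
      | some s => simp
    · simp [aFind, altGo, h]
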